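-- pv_equiv track=rewrite | github.com/HarishKMurali/VLSI-Lab | Sim file generator/main.py | gate_structure
-- ===== SOURCE A (Python) =====
-- def gate_structure(exp):   # function to write contents of gate structure to a list
-- 	stack=[]
-- 	simfile=[]
-- 	out_number=0
-- 	node_number=0
--
-- 	for i in range(len(exp)):
-- 		elem=exp[i]
-- 		if(elem=='.'):
-- 			a=stack.pop()
-- 			b=stack.pop()
-- 			simfile.append('p '+a+' vdd out'+str(out_number)+' 2 4\n')
-- 			simfile.append('p '+b+' vdd out'+str(out_number)+' 2 4\n')
-- 			simfile.append('n '+a+' gnd '+str(node_number)+' 2 4\n')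
-- 			simfile.append('n '+b+' '+str(node_number)+' out'+str(out_number)+' 2 4\n')
--
-- 			simfile.append('p out'+str(out_number)+' vdd out'+str(out_number+1)+' 2 4\n')
-- 			simfile.append('n out'+str(out_number)+' gnd out'+str(out_number+1)+' 2 4\n')
-- 			stack.append('out'+str(out_number+1))
-- 			out_number+=2
-- 			node_number+=1
--
-- 		elif(elem=='+'):
-- 			a=stack.pop()
-- 			b=stack.pop()
-- 			simfile.append('p '+a+' vdd '+str(node_number)+' 2 4\n')
-- 			simfile.append('p '+b+' '+str(node_number)+' out'+str(out_number)+' 2 4\n')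
-- 			simfile.append('n '+a+' gnd out'+str(out_number)+' 2 4\n')
-- 			simfile.append('n '+b+' gnd out'+str(out_number)+' 2 4\n')
--
-- 			simfile.append('p out'+str(out_number)+' vdd out'+str(out_number+1)+' 2 4\n')
-- 			simfile.append('n out'+str(out_number)+' gnd out'+str(out_number+1)+' 2 4\n')
-- 			stack.append('out'+str(out_number+1))
-- 			out_number+=2
-- 			node_number+=1
--
-- 		elif(elem=='!'):
-- 			a=stack.pop()
-- 			simfile.append('p '+a+' vdd out'+str(out_number)+' 2 4\n')
-- 			simfile.append('n '+a+' gnd out'+str(out_number)+' 2 4\n')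
-- 			stack.append('out'+str(out_number))
-- 			out_number+=1
--
-- 		else:
-- 			stack.append(elem)
-- 	simfile.append('out'+str(out_number-1))
-- 	return simfile
-- ===== SOURCE B (Python) =====
-- def gate_structure(exp):
--     # Build an explicit expression tree from the postfix string, then emit the
--     # netlist by a recursive post-order traversal threading the counters.
--     stack = []
--     for elem in exp:
--         if elem == '.':
--             a = stack.pop()
--             b = stack.pop()
--             stack.append(('.', b, a))
--         elif elem == '+':
--             a = stack.pop()
--             b = stack.pop()
--             stack.append(('+', b, a))
--         elif elem == '!':
--             a = stack.pop()
--             stack.append(('!', a))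
--         else:
--             stack.append(('leaf', elem))
--
--     out = []
--
--     def emit(node, o, n):
--         # returns (label, out_number, node_number)
--         kind = node[0]
--         if kind == 'leaf':
--             return node[1], o, n
--         if kind == '!':
--             a, o, n = emit(node[1], o, n)
--             out.append('p ' + a + ' vdd out' + str(o) + ' 2 4\n')
--             out.append('n ' + a + ' gnd out' + str(o) + ' 2 4\n')
--             return 'out' + str(o), o + 1, n
--         b, o, n = emit(node[1], o, n)
--         a, o, n = emit(node[2], o, n)
--         if kind == '.':
--             out.append('p ' + a + ' vdd out' + str(o) + ' 2 4\n')
--             out.append('p ' + b + ' vdd out' + str(o) + ' 2 4\n')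
--             out.append('n ' + a + ' gnd ' + str(n) + ' 2 4\n')
--             out.append('n ' + b + ' ' + str(n) + ' out' + str(o) + ' 2 4\n')
--         else:
--             out.append('p ' + a + ' vdd ' + str(n) + ' 2 4\n')
--             out.append('p ' + b + ' ' + str(n) + ' out' + str(o) + ' 2 4\n')
--             out.append('n ' + a + ' gnd out' + str(o) + ' 2 4\n')
--             out.append('n ' + b + ' gnd out' + str(o) + ' 2 4\n')
--         out.append('p out' + str(o) + ' vdd out' + str(o + 1) + ' 2 4\n')
--         out.append('n out' + str(o) + ' gnd out' + str(o + 1) + ' 2 4\n')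
--         return 'out' + str(o + 1), o + 2, n + 1
--
--     o, n = 0, 0
--     for node in stack:           # bottom to top: postfix emission order
--         _, o, n = emit(node, o, n)
--     out.append('out' + str(o - 1))
--     return out
-- ===== Notes on version B (the rewrite author's own statement) =====
-- stated objective: alternative
-- what changed: B first parses the postfix string into an explicit expression tree in one stack pass and then emits the netlist by a recursive post-order traversal threading the counters, instead of A's single flat loop that emits lines while popping label strings.
import Mathlib
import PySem

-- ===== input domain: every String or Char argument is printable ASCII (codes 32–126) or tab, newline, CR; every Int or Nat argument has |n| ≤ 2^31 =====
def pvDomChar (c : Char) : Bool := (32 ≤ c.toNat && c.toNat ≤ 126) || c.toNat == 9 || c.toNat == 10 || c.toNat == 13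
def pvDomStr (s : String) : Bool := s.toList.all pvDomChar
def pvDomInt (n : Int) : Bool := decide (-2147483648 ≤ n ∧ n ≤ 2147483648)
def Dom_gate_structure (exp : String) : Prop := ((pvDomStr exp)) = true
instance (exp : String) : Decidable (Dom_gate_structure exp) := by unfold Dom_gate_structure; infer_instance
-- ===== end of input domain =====

-- B builds an explicit expression tree from the postfix string, then emits the netlist
-- by a recursive post-order traversal (alternative decomposition, same cost).


-- ===== PORT A =====
-- the 6 lines appended for '.' with operands a (first pop) and b, counters o n
def andLines (a b : String) (o n : Int) : List String :=
  [ "p " ++ a ++ " vdd out" ++ PySem.Int.toStr o ++ " 2 4\n"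
  , "p " ++ b ++ " vdd out" ++ PySem.Int.toStr o ++ " 2 4\n"
  , "n " ++ a ++ " gnd " ++ PySem.Int.toStr n ++ " 2 4\n"
  , "n " ++ b ++ " " ++ PySem.Int.toStr n ++ " out" ++ PySem.Int.toStr o ++ " 2 4\n"
  , "p out" ++ PySem.Int.toStr o ++ " vdd out" ++ PySem.Int.toStr (o+1) ++ " 2 4\n"
  , "n out" ++ PySem.Int.toStr o ++ " gnd out" ++ PySem.Int.toStr (o+1) ++ " 2 4\n" ]

-- the 6 lines appended for '+'
def orLines (a b : String) (o n : Int) : List String :=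
  [ "p " ++ a ++ " vdd " ++ PySem.Int.toStr n ++ " 2 4\n"
  , "p " ++ b ++ " " ++ PySem.Int.toStr n ++ " out" ++ PySem.Int.toStr o ++ " 2 4\n"
  , "n " ++ a ++ " gnd out" ++ PySem.Int.toStr o ++ " 2 4\n"
  , "n " ++ b ++ " gnd out" ++ PySem.Int.toStr o ++ " 2 4\n"
  , "p out" ++ PySem.Int.toStr o ++ " vdd out" ++ PySem.Int.toStr (o+1) ++ " 2 4\n"
  , "n out" ++ PySem.Int.toStr o ++ " gnd out" ++ PySem.Int.toStr (o+1) ++ " 2 4\n" ]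

-- the 2 lines appended for '!'
def notLines (a : String) (o : Int) : List String :=
  [ "p " ++ a ++ " vdd out" ++ PySem.Int.toStr o ++ " 2 4\n"
  , "n " ++ a ++ " gnd out" ++ PySem.Int.toStr o ++ " 2 4\n" ]

-- A's loop, step for step; the stack holds label strings, head = top; none = IndexError
def gsLoopA : List Char → List String → List String → Int → Int → Option (List String)
  | [], _, simfile, o, _ => some (simfile ++ ["out" ++ PySem.Int.toStr (o - 1)])
  | c :: cs, stack, simfile, o, n =>
    if c = '.' then
      match stack with
      | a :: b :: rest =>
          gsLoopA cs (("out" ++ PySem.Int.toStr (o+1)) :: rest)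
            (simfile ++ andLines a b o n) (o+2) (n+1)
      | _ => none
    else if c = '+' then
      match stack with
      | a :: b :: rest =>
          gsLoopA cs (("out" ++ PySem.Int.toStr (o+1)) :: rest)
            (simfile ++ orLines a b o n) (o+2) (n+1)
      | _ => none
    else if c = '!' then
      match stack with
      | a :: rest =>
          gsLoopA cs (("out" ++ PySem.Int.toStr o) :: rest)
            (simfile ++ notLines a o) (o+1) n
      | _ => none
    else
      gsLoopA cs (String.singleton c :: stack) simfile o n

def gate_structure (exp : String) : List String :=
  (gsLoopA exp.toList [] [] 0 0).getD []

-- ===== PORT B =====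
inductive GTree : Type
  | leaf : String → GTree
  | notg : GTree → GTree
  | andg : GTree → GTree → GTree   -- left = second pop b, right = first pop a
  | org  : GTree → GTree → GTree
deriving DecidableEq, Repr

-- one stack pass turning the postfix string into trees; none = IndexError
def buildB : List Char → List GTree → Option (List GTree)
  | [], st => some st
  | c :: cs, st =>
    if c = '.' then
      match st with
      | a :: b :: rest => buildB cs (GTree.andg b a :: rest)
      | _ => none
    else if c = '+' then
      match st with
      | a :: b :: rest => buildB cs (GTree.org b a :: rest)
      | _ => none
    else if c = '!' then
      match st with
      | a :: rest => buildB cs (GTree.notg a :: rest)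
      | _ => none
    else
      buildB cs (GTree.leaf (String.singleton c) :: st)

-- post-order emission: returns (lines, label, out_number, node_number)
def emitB : GTree → Int → Int → (List String × String × Int × Int)
  | GTree.leaf s, o, n => ([], s, o, n)
  | GTree.notg t, o, n =>
    let (l, a, o1, n1) := emitB t o n
    (l ++ notLines a o1, "out" ++ PySem.Int.toStr o1, o1 + 1, n1)
  | GTree.andg tb ta, o, n =>
    let (lb, b, o1, n1) := emitB tb o n
    let (la, a, o2, n2) := emitB ta o1 n1
    (lb ++ la ++ andLines a b o2 n2, "out" ++ PySem.Int.toStr (o2+1), o2 + 2, n2 + 1)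
  | GTree.org tb ta, o, n =>
    let (lb, b, o1, n1) := emitB tb o n
    let (la, a, o2, n2) := emitB ta o1 n1
    (lb ++ la ++ orLines a b o2 n2, "out" ++ PySem.Int.toStr (o2+1), o2 + 2, n2 + 1)

-- emit the remaining stack bottom-to-top; returns (lines, labels head = top, o, n)
def emitStack : List GTree → Int → Int → (List String × List String × Int × Int)
  | [], o, n => ([], [], o, n)
  | t :: ts, o, n =>
    let (ls, labs, o1, n1) := emitStack ts o n
    let (l, a, o2, n2) := emitB t o1 n1
    (ls ++ l, a :: labs, o2, n2)

def gate_structure_alt (exp : String) : List String :=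
  match buildB exp.toList [] with
  | none => []
  | some st =>
    let (ls, _, o, _) := emitStack st 0 0
    ls ++ ["out" ++ PySem.Int.toStr (o - 1)]

-- ===== PRECONDITION & SPEC =====
-- balancedness of the postfix string: every operator finds its operand(s) on the stack
def gsOk : List Char → Int → Bool
  | [], _ => true
  | c :: cs, d =>
    if c = '.' ∨ c = '+' then decide (2 ≤ d) && gsOk cs (d - 1)
    else if c = '!' then decide (1 ≤ d) && gsOk cs d
    else gsOk cs (d + 1)

-- Pre_ excludes exactly the malformed postfix strings on which A's stack underflows
-- and Python raises IndexError (B raises there too).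
def Pre_gate_structure (exp : String) : Prop := gsOk exp.toList 0 = true
instance (exp : String) : Decidable (Pre_gate_structure exp) := by
  unfold Pre_gate_structure; infer_instance

def pvWitness_gate_structure : String := "ab.c+!"

def Spec_gate_structure (exp : String) (out : List String) : Prop := out = gate_structure_alt exp
instance (exp : String) (out : List String) : Decidable (Spec_gate_structure exp out) := by
  unfold Spec_gate_structure; infer_instance

-- ===== CLAIM (what is proved, stated in full; the proofs are below) =====
def Claim_equal_gate_structure : Prop := ∀ (exp : String), Dom_gate_structure exp → Pre_gate_structure exp → Spec_gate_structure exp (gate_structure exp)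

-- ===== LEMMAS AND PROOFS =====

-- shape of one emitStack step, with all components named
theorem emitStack_cons_eq (t : GTree) (ts : List GTree) (o n : Int)
    (ls : List String) (labs : List String) (o1 n1 : Int)
    (l : List String) (a : String) (o2 n2 : Int)
    (h1 : emitStack ts o n = (ls, labs, o1, n1))
    (h2 : emitB t o1 n1 = (l, a, o2, n2)) :
    emitStack (t :: ts) o n = (ls ++ l, a :: labs, o2, n2) := by
  simp [emitStack, h1, h2]

-- key invariant: A's loop run from the state described by emitStack of B's tree stack
-- produces exactly B's emission of the final tree stack.
theorem gs_key : ∀ (cs : List Char) (st : List GTree) (ls labs : List String) (o n : Int),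
    gsOk cs (st.length : Int) = true →
    emitStack st 0 0 = (ls, labs, o, n) →
    ∃ st', buildB cs st = some st' ∧
      gsLoopA cs labs ls o n =
      some ((emitStack st' 0 0).1 ++
        ["out" ++ PySem.Int.toStr ((emitStack st' 0 0).2.2.1 - 1)]) := by
  intro cs
  induction cs with
  | nil =>
      intro st ls labs o n _ heq
      exact ⟨st, rfl, by simp [gsLoopA, heq]⟩
  | cons c cs ih =>
      intro st ls labs o n hok heq
      by_cases hdot : c = '.'
      · subst hdot
        simp [gsOk] at hok
        obtain ⟨hlen, hok'⟩ := hok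
        obtain ⟨ta, tb, rest, rfl⟩ : ∃ ta tb rest, st = ta :: tb :: rest := by
          rcases st with _ | ⟨ta, _ | ⟨tb, rest⟩⟩
          · exact absurd hlen (by simp)
          · exact absurd hlen (by simp)
          · exact ⟨ta, tb, rest, rfl⟩
        rcases h1 : emitStack rest 0 0 with ⟨lr, labr, o1, n1⟩
        rcases h2 : emitB tb o1 n1 with ⟨lb, b, o2, n2⟩
        rcases h3 : emitB ta o2 n2 with ⟨la, a, o3, n3⟩
        have hcur : emitStack (ta :: tb :: rest) 0 0 = (lr ++ lb ++ la, a :: b :: labr, o3, n3) :=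
          emitStack_cons_eq _ _ _ _ _ _ _ _ _ _ _ _
            (emitStack_cons_eq _ _ _ _ _ _ _ _ _ _ _ _ h1 h2) h3
        rw [heq] at hcur
        obtain ⟨hls, hlabs, ho, hn⟩ := by simpa [Prod.ext_iff] using hcur.symm
        have hnew : emitStack (GTree.andg tb ta :: rest) 0 0 =
            (lr ++ (lb ++ la ++ andLines a b o3 n3),
             ("out" ++ PySem.Int.toStr (o3+1)) :: labr, o3 + 2, n3 + 1) := by
          simp [emitStack, emitB, h1, h2, h3]
        have hok2 : gsOk cs (((GTree.andg tb ta :: rest).length : Nat) : Int) = true := by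
          have : (((GTree.andg tb ta :: rest).length : Nat) : Int)
              = ((ta :: tb :: rest).length : Int) - 1 := by simp only [List.length_cons]; push_cast; omega
          rw [this]; exact hok'
        obtain ⟨st', hb, hl⟩ := ih (GTree.andg tb ta :: rest) _ _ _ _ hok2 hnew
        refine ⟨st', by simpa [buildB] using hb, ?_⟩
        subst hls ho hn
        rw [← hlabs]
        simpa [gsLoopA, List.append_assoc] using hl
      · by_cases hplus : c = '+'
        · subst hplus
          simp [gsOk] at hok
          obtain ⟨hlen, hok'⟩ := hok
          obtain ⟨ta, tb, rest, rfl⟩ : ∃ ta tb rest, st = ta :: tb :: rest := by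
            rcases st with _ | ⟨ta, _ | ⟨tb, rest⟩⟩
            · exact absurd hlen (by simp)
            · exact absurd hlen (by simp)
            · exact ⟨ta, tb, rest, rfl⟩
          rcases h1 : emitStack rest 0 0 with ⟨lr, labr, o1, n1⟩
          rcases h2 : emitB tb o1 n1 with ⟨lb, b, o2, n2⟩
          rcases h3 : emitB ta o2 n2 with ⟨la, a, o3, n3⟩
          have hcur : emitStack (ta :: tb :: rest) 0 0 = (lr ++ lb ++ la, a :: b :: labr, o3, n3) :=
            emitStack_cons_eq _ _ _ _ _ _ _ _ _ _ _ _
              (emitStack_cons_eq _ _ _ _ _ _ _ _ _ _ _ _ h1 h2) h3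
          rw [heq] at hcur
          obtain ⟨hls, hlabs, ho, hn⟩ := by simpa [Prod.ext_iff] using hcur.symm
          have hnew : emitStack (GTree.org tb ta :: rest) 0 0 =
              (lr ++ (lb ++ la ++ orLines a b o3 n3),
               ("out" ++ PySem.Int.toStr (o3+1)) :: labr, o3 + 2, n3 + 1) := by
            simp [emitStack, emitB, h1, h2, h3]
          have hok2 : gsOk cs (((GTree.org tb ta :: rest).length : Nat) : Int) = true := by
            have : (((GTree.org tb ta :: rest).length : Nat) : Int)
                = ((ta :: tb :: rest).length : Int) - 1 := by simp only [List.length_cons]; push_cast; omega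
            rw [this]; exact hok'
          obtain ⟨st', hb, hl⟩ := ih (GTree.org tb ta :: rest) _ _ _ _ hok2 hnew
          refine ⟨st', by simpa [buildB, hdot] using hb, ?_⟩
          subst hls ho hn
          rw [← hlabs]
          simpa [gsLoopA, hdot, List.append_assoc] using hl
        · by_cases hbang : c = '!'
          · subst hbang
            simp [gsOk] at hok
            obtain ⟨hlen, hok'⟩ := hok
            obtain ⟨ta, rest, rfl⟩ : ∃ ta rest, st = ta :: rest := by
              rcases st with _ | ⟨ta, rest⟩
              · exact absurd hlen (by simp)
              · exact ⟨ta, rest, rfl⟩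
            rcases h1 : emitStack rest 0 0 with ⟨lr, labr, o1, n1⟩
            rcases h2 : emitB ta o1 n1 with ⟨la, a, o2, n2⟩
            have hcur : emitStack (ta :: rest) 0 0 = (lr ++ la, a :: labr, o2, n2) :=
              emitStack_cons_eq _ _ _ _ _ _ _ _ _ _ _ _ h1 h2
            rw [heq] at hcur
            obtain ⟨hls, hlabs, ho, hn⟩ := by simpa [Prod.ext_iff] using hcur.symm
            have hnew : emitStack (GTree.notg ta :: rest) 0 0 =
                (lr ++ (la ++ notLines a o2),
                 ("out" ++ PySem.Int.toStr o2) :: labr, o2 + 1, n2) := by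
              simp [emitStack, emitB, h1, h2]
            have hok2 : gsOk cs (((GTree.notg ta :: rest).length : Nat) : Int) = true := by
              have : (((GTree.notg ta :: rest).length : Nat) : Int)
                  = ((ta :: rest).length : Int) := by simp
              rw [this]; exact hok'
            obtain ⟨st', hb, hl⟩ := ih (GTree.notg ta :: rest) _ _ _ _ hok2 hnew
            refine ⟨st', by simpa [buildB, hdot, hplus] using hb, ?_⟩
            subst hls ho hn
            rw [← hlabs]
            simpa [gsLoopA, hdot, hplus, List.append_assoc] using hl
          · -- operand character: push a leaf
            simp [gsOk, hdot, hplus, hbang] at hok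
            have hnew : emitStack (GTree.leaf (String.singleton c) :: st) 0 0 =
                (ls, String.singleton c :: labs, o, n) := by
              have := emitStack_cons_eq (GTree.leaf (String.singleton c)) st 0 0
                ls labs o n [] (String.singleton c) o n heq (by simp [emitB])
              simpa using this
            have hok2 : gsOk cs (((GTree.leaf (String.singleton c) :: st).length : Nat) : Int) = true := by
              have : (((GTree.leaf (String.singleton c) :: st).length : Nat) : Int)
                  = (st.length : Int) + 1 := by simp
              rw [this]; exact hok
            obtain ⟨st', hb, hl⟩ := ih (GTree.leaf (String.singleton c) :: st) _ _ _ _ hok2 hnew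
            refine ⟨st', by simpa [buildB, hdot, hplus, hbang] using hb, ?_⟩
            simpa [gsLoopA, hdot, hplus, hbang] using hl

-- ===== VERDICT (by name: the statement is the Claim_ definition above) =====
theorem gate_structure_spec : Claim_equal_gate_structure := by
  intro exp _ hpre
  unfold Spec_gate_structure gate_structure gate_structure_alt
  have h0 : emitStack ([] : List GTree) 0 0 = ([], [], 0, 0) := rfl
  have hok : gsOk exp.toList ((([] : List GTree).length : Nat) : Int) = true := by
    simpa using hpre
  obtain ⟨st', hb, hl⟩ := gs_key exp.toList [] [] [] 0 0 hok h0
  rw [hb, hl]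
  rcases h : emitStack st' 0 0 with ⟨ls', labs', o', n'⟩
  simp [h]
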